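-- pv_equiv track=rewrite | github.com/charliegeannew/codeSpaceGit | leetcode/finish/1471.py | getStrongest
-- ===== SOURCE A (Python) =====
-- from typing import List
--
-- def getStrongest(arr: List[int], k: int) -> List[int]:
--     arr.sort()
--     m=arr[int((len(arr)-1)/2)]
--     bInd=0
--     eInd=len(arr)-1
--     res=[]
--     while len(res)<k:
--         if arr[eInd]-m>=m-arr[bInd]:
--             res.append(arr[eInd])
--             eInd-=1
--         else:
--             res.append(arr[bInd])
--             bInd+=1
--     return res
-- ===== SOURCE B (Python) =====
-- def getStrongest(arr, k):
--     arr.sort()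
--     m = arr[(len(arr) - 1) // 2]
--     return sorted(arr, key=lambda x: (abs(x - m), x), reverse=True)[:max(k, 0)]
-- ===== Notes on version B (the rewrite author's own statement) =====
-- stated objective: simpler
-- what changed: Replaces the two-pointer merge loop over the sorted array by a single sort with strength key (abs(x-m), x) descending and a slice of the first k elements.
-- outside the precondition, e.g. on getStrongest([1, 2], 3): A returns [2, 1, 2], B returns [2, 1]
import Mathlib
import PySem

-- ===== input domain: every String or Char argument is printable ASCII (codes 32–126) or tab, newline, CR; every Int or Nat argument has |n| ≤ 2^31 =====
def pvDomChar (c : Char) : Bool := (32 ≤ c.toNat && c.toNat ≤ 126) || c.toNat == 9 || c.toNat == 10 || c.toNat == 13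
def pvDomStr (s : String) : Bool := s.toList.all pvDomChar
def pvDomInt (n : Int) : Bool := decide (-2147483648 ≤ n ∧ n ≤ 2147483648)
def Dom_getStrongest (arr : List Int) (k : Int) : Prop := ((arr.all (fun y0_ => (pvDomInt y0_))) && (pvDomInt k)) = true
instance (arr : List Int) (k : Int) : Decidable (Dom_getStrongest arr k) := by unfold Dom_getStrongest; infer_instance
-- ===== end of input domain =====

-- B replaces A's two-pointer merge loop by one sort with strength key (abs(x-m), x) descending
-- plus a slice of the first k elements (objective: simpler). Both mutate `arr` (arr.sort());
-- the equivalence proved here is about the RETURN value (the mutation is identical anyway).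

-- ===== PORT A =====
-- the while-loop: runs while len(res) < k; appends one element per iteration.
-- `(… .pyGet?).getD 0`: the 0 default is reachable only on inputs excluded by Pre_ (IndexError in Python).
def pvLoopA (s : List Int) (m k : Int) (bInd eInd : Int) (res : List Int) : List Int :=
  if (res.length : Int) < k then
    if (PySem.List.pyGet? s eInd).getD 0 - m ≥ m - (PySem.List.pyGet? s bInd).getD 0 then
      pvLoopA s m k bInd (eInd - 1) (res ++ [(PySem.List.pyGet? s eInd).getD 0])
    else
      pvLoopA s m k (bInd + 1) eInd (res ++ [(PySem.List.pyGet? s bInd).getD 0])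
  else res
termination_by (k - res.length).toNat
decreasing_by all_goals (simp_all; omega)

-- `Int.tdiv` truncates toward zero, exactly like Python's int((len(arr)-1)/2)
-- (the float division is exact here since |len(arr)-1| < 2^53).
def getStrongest (arr : List Int) (k : Int) : List Int :=
  let s := PySem.List.sorted arr (fun x => x)          -- arr.sort()
  let m := (PySem.List.pyGet? s (Int.tdiv ((s.length : Int) - 1) 2)).getD 0
  pvLoopA s m k 0 ((s.length : Int) - 1) []

-- ===== PORT B =====
def getStrongest_alt (arr : List Int) (k : Int) : List Int :=
  let s := PySem.List.sorted arr (fun x => x)          -- arr.sort()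
  let m := (PySem.List.pyGet? s (PySem.Int.floordiv ((s.length : Int) - 1) 2)).getD 0
  PySem.List.slice (PySem.List.sorted2 s (fun x => |x - m|) (fun x => x) true) none (some (max k 0))

-- ===== PRECONDITION & SPEC =====
-- Pre_ excludes the empty list (A raises IndexError) and k > len(arr), which is outside the
-- problem's stated domain (1 ≤ k ≤ len): there A's loop reads negative indices, returning
-- accidental wraparound duplicates until it eventually raises IndexError.
def Pre_getStrongest (arr : List Int) (k : Int) : Prop :=
  arr ≠ [] ∧ k ≤ (arr.length : Int)
instance (arr : List Int) (k : Int) : Decidable (Pre_getStrongest arr k) := by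
  unfold Pre_getStrongest; infer_instance
def pvWitness_getStrongest : List Int × Int := ([1, 2, 3], 2)

def Spec_getStrongest (arr : List Int) (k : Int) (out : List Int) : Prop := out = getStrongest_alt arr k
instance (arr : List Int) (k : Int) (out : List Int) : Decidable (Spec_getStrongest arr k out) := by unfold Spec_getStrongest; infer_instance

-- ===== CLAIM (what is proved, stated in full; the proofs are below) =====
def Claim_equal_getStrongest : Prop := ∀ (arr : List Int) (k : Int), Dom_getStrongest arr k → Pre_getStrongest arr k → Spec_getStrongest arr k (getStrongest arr k)


-- ===== LEMMAS AND PROOFS =====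

-- single integer strength key equivalent to the lexicographic pair (|x - m|, x)
def pvKey (m x : Int) : Int := if m ≤ x then 2 * (x - m) + 1 else 2 * (m - x)

-- the two-pointer merge, on the remaining segment as a list
def pvMerge (m : Int) : List Int → List Int
  | [] => []
  | x :: xs =>
    if (x :: xs).getLast (by simp) - m ≥ m - x then
      (x :: xs).getLast (by simp) :: pvMerge m (x :: xs).dropLast
    else
      x :: pvMerge m xs
termination_by t => t.length
decreasing_by all_goals simp

theorem pvKey_inj (m : Int) : Function.Injective (pvKey m) := by
  intro a b h
  simp only [pvKey] at h
  split_ifs at h <;> omega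

theorem pv_tdiv_eq_fdiv (a : Int) (h : 0 ≤ a) : a.tdiv 2 = a.fdiv 2 := by
  obtain ⟨n, rfl⟩ := Int.eq_ofNat_of_zero_le h
  cases n <;> rfl

theorem pvKey_le_e {m x e y : Int} (hxy : x ≤ y) (hye : y ≤ e) (hc : e - m ≥ m - x) :
    pvKey m y ≤ pvKey m e := by
  simp only [pvKey]; split_ifs <;> omega

theorem pvKey_le_x {m x e y : Int} (hxy : x ≤ y) (hye : y ≤ e) (hc : ¬(e - m ≥ m - x)) :
    pvKey m y ≤ pvKey m x := by
  simp only [pvKey]; split_ifs <;> omega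

theorem pv_le_getLast (l : List Int) (h : l.Pairwise (· ≤ ·)) (hne : l ≠ []) :
    ∀ y ∈ l, y ≤ l.getLast hne := by
  intro y hy
  rw [← List.dropLast_append_getLast hne] at h hy
  rcases List.mem_append.mp hy with h1 | h1
  · exact (List.pairwise_append.mp h).2.2 y h1 _ (List.mem_singleton_self _)
  · simp only [List.mem_singleton] at h1
    exact le_of_eq h1

theorem pvMerge_perm (m : Int) (t : List Int) : (pvMerge m t).Perm t := by
  generalize hn : t.length = n
  induction n using Nat.strong_induction_on generalizing t with
  | _ n ih =>
    match t with
    | [] => simp [pvMerge]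
    | x :: xs =>
      rw [pvMerge]
      have hne : (x :: xs : List Int) ≠ [] := by simp
      split_ifs with hc
      · have hd : (x :: xs).dropLast.length < n := by
          simp at hn ⊢; omega
        have hperm := ih _ hd (x :: xs).dropLast rfl
        refine (hperm.cons _).trans ?_
        conv_rhs => rw [← List.dropLast_append_getLast hne]
        exact (List.perm_append_singleton _ _).symm
      · have hd : xs.length < n := by simp at hn; omega
        exact (ih _ hd xs rfl).cons x

theorem pvMerge_pairwise (m : Int) (t : List Int) (h : t.Pairwise (· ≤ ·)) :
    (pvMerge m t).Pairwise (fun a b => pvKey m b ≤ pvKey m a) := by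
  generalize hn : t.length = n
  induction n using Nat.strong_induction_on generalizing t with
  | _ n ih =>
    match t with
    | [] => simp [pvMerge]
    | x :: xs =>
      rw [pvMerge]
      have hne : (x :: xs : List Int) ≠ [] := by simp
      have hhead : ∀ y ∈ x :: xs, x ≤ y := by
        intro y hy
        rcases List.mem_cons.mp hy with rfl | hy'
        · exact le_rfl
        · exact List.rel_of_pairwise_cons h hy'
      have hlast := pv_le_getLast _ h hne
      split_ifs with hc
      · have hd : (x :: xs).dropLast.length < n := by simp at hn ⊢; omega
        have hsub : (x :: xs).dropLast.Pairwise (· ≤ ·) := h.sublist (List.dropLast_sublist _)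
        refine List.pairwise_cons.mpr ⟨?_, ih _ hd _ hsub rfl⟩
        intro y hy
        have hy' : y ∈ (x :: xs).dropLast := ((pvMerge_perm m _).mem_iff).mp hy
        have hy'' : y ∈ x :: xs := (List.dropLast_sublist _).mem hy'
        exact pvKey_le_e (hhead y hy'') (hlast y hy'') hc
      · have hd : xs.length < n := by simp at hn; omega
        refine List.pairwise_cons.mpr ⟨?_, ih _ hd _ (List.Pairwise.sublist (List.sublist_cons_self x xs) h) rfl⟩
        intro y hy
        have hy' : y ∈ xs := ((pvMerge_perm m xs).mem_iff).mp hy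
        have hy'' : y ∈ x :: xs := List.mem_cons_of_mem x hy'
        exact pvKey_le_x (hhead y hy'') (hlast y hy'') hc

-- A's loop computes take k of the merge of the remaining segment
theorem pvLoopA_spec (s : List Int) (m : Int) :
    ∀ (j : Nat) (t : List Int) (b : Nat) (res : List Int) (k : Int),
      (k - res.length).toNat = j →
      t = (s.drop b).take t.length →
      b + t.length ≤ s.length →
      k - res.length ≤ (t.length : Int) →
      pvLoopA s m k (b : Int) ((b : Int) + t.length - 1) res
        = res ++ (pvMerge m t).take (k - res.length).toNat := by
  intro j
  induction j with
  | zero =>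
    intro t b res k hj ht hb hk
    rw [pvLoopA, if_neg (by omega), hj]
    simp
  | succ j ihj =>
    intro t b res k hj ht hb hk
    have hlt : (res.length : Int) < k := by omega
    have htlen : 1 ≤ t.length := by
      by_contra hle
      have : t.length = 0 := by omega
      omega
    match t, ht with
    | x :: xs, ht =>
      have hL : (x :: xs).length = xs.length + 1 := by simp
      have hsplit : s.drop b = (x :: xs) ++ (s.drop b).drop (xs.length + 1) := by
        conv_lhs => rw [← List.take_append_drop (xs.length + 1) (s.drop b)]
        rw [hL] at ht
        rw [← ht]
      have hlen_drop : xs.length + 1 ≤ (s.drop b).length := by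
        simp at hb ⊢; omega
      have hheadx : (PySem.List.pyGet? s (b : Int)).getD 0 = x := by
        rw [PySem.List.pyGet?_natCast, ← List.head?_drop, hsplit]
        rfl
      have hlast_mem : (x :: xs).getLast (by simp) = s[b + xs.length]'(by simp at hb; omega) := by
        have h0 : (x :: xs).getLast (by simp) = (x :: xs)[xs.length]'(by simp) := by
          simp only [List.getLast_eq_getElem, List.length_cons, Nat.add_sub_cancel]
          rfl
        have h2 : (s.drop b)[xs.length]'(by omega) = (x :: xs)[xs.length]'(by simp) := by
          rw [List.getElem_of_eq hsplit, List.getElem_append_left (by simp)]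
        have h3 : (s.drop b)[xs.length]'(by omega) = s[b + xs.length]'(by simp at hb; omega) :=
          List.getElem_drop
        rw [h0, ← h2, h3]
      have hlaste : (PySem.List.pyGet? s ((b : Int) + ((x :: xs).length : Int) - 1)).getD 0
          = (x :: xs).getLast (by simp) := by
        have hidx : (b : Int) + ((x :: xs).length : Int) - 1 = ((b + xs.length : Nat) : Int) := by
          push_cast [hL]; ring
        rw [hidx, PySem.List.pyGet?_natCast, hlast_mem]
        rw [List.getElem?_eq_getElem (by simp at hb; omega)]
        rfl
      rw [pvLoopA, if_pos hlt, hheadx, hlaste, pvMerge]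
      split_ifs with hc
      · -- take from the end
        have hdl : (x :: xs).dropLast = (s.drop b).take xs.length := by
          rw [List.dropLast_eq_take, hL, hsplit]
          simp only [Nat.add_sub_cancel]
          rw [List.take_append_of_le_length (by simp)]
        have hcall := ihj (x :: xs).dropLast b (res ++ [(x :: xs).getLast (by simp)]) k
          (by simp at hj ⊢; omega)
          (by rw [List.length_dropLast, hL]; simpa using hdl)
          (by simp [hL] at hb ⊢; omega)
          (by simp [hL] at hk ⊢; omega)
        have hidx2 : (b : Int) + ((x :: xs).length : Int) - 1 - 1
            = (b : Int) + (((x :: xs).dropLast.length : Nat) : Int) - 1 := by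
          simp; omega
        rw [hidx2, hcall]
        have htk : (k - res.length).toNat = ((k - (res ++ [(x :: xs).getLast (by simp)]).length).toNat) + 1 := by
          simp; omega
        rw [htk, List.take_succ_cons]
        simp
      · -- take from the front
        have hxs : xs = (s.drop (b + 1)).take xs.length := by
          have : s.drop (b + 1) = xs ++ (s.drop b).drop (xs.length + 1) := by
            have h1 : s.drop (b + 1) = (s.drop b).tail := by
              rw [List.tail_drop]
            rw [h1, hsplit]
            simp
          rw [this, List.take_left]
        have hcall := ihj xs (b + 1) (res ++ [x]) k
          (by simp at hj ⊢; omega)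
          (by simpa using hxs)
          (by simp [hL] at hb ⊢; omega)
          (by simp [hL] at hk ⊢; omega)
        have hidx3 : ((b + 1 : Nat) : Int) + (xs.length : Int) - 1
            = (b : Int) + ((x :: xs).length : Int) - 1 := by push_cast [hL]; ring
        rw [show ((b : Int) + 1) = ((b + 1 : Nat) : Int) by push_cast; ring] at *
        rw [← hidx3, hcall]
        have htk : (k - res.length).toNat = ((k - (res ++ [x]).length).toNat) + 1 := by
          simp; omega
        rw [htk, List.take_succ_cons]
        simp

-- B's sort equals the single-key sort
theorem sorted2_eq_sorted_pvKey (s : List Int) (m : Int) :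
    PySem.List.sorted2 s (fun x => |x - m|) (fun x => x) true
      = PySem.List.sorted s (pvKey m) true := by
  show List.foldl _ [] s = _
  rw [PySem.List.sorted_rev_eq_foldl_insertBy]
  congr 1
  funext acc x
  congr 1
  funext a b
  have hiff : (|b - m| < |a - m| ∨ (|b - m| ≤ |a - m| ∧ b < a)) ↔ pvKey m b < pvKey m a := by
    simp only [pvKey]
    rcases abs_cases (a - m) with ⟨h1, h2⟩ | ⟨h1, h2⟩ <;>
      rcases abs_cases (b - m) with ⟨h3, h4⟩ | ⟨h3, h4⟩ <;> split_ifs <;> omega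
  calc (decide (|b - m| < |a - m|) || (!decide (|a - m| < |b - m|) && decide (b < a)))
      = decide (|b - m| < |a - m| ∨ (|b - m| ≤ |a - m| ∧ b < a)) := by
        have hb : (!decide (|a - m| < |b - m|)) = decide (|b - m| ≤ |a - m|) := by
          rw [← decide_not]
          exact decide_eq_decide.mpr not_lt
        rw [Bool.decide_or, Bool.decide_and, hb]
    _ = decide (pvKey m b < pvKey m a) := decide_eq_decide.mpr hiff

-- the merge of the ascending-sorted list IS the descending key sort
theorem pvMerge_eq_sorted_rev (m : Int) (t : List Int) (h : t.Pairwise (· ≤ ·)) :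
    pvMerge m t = PySem.List.sorted t (pvKey m) true := by
  have h1 := pvMerge_perm m t
  have h2 := pvMerge_pairwise m t h
  have h3 := PySem.List.sorted_perm t (pvKey m) true
  have h4 := PySem.List.sorted_pairwise_rev t (pvKey m)
  refine List.reverse_inj.mp ?_
  refine PySem.List.eq_of_perm_of_pairwise_le_of_injective (pvKey m) (pvKey_inj m) ?_ ?_ ?_
  · exact (List.reverse_perm _).trans (h1.trans (h3.symm.trans (List.reverse_perm _).symm))
  · exact List.pairwise_reverse.mpr h2
  · exact List.pairwise_reverse.mpr h4

-- ===== VERDICT (by name: the statement is the Claim_ definition above) =====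
theorem getStrongest_spec : Claim_equal_getStrongest := by
  unfold Claim_equal_getStrongest
  intro arr k _hdom hpre
  obtain ⟨hne, hkle⟩ := hpre
  unfold Spec_getStrongest getStrongest getStrongest_alt
  simp only []
  generalize hs : PySem.List.sorted arr (fun x => x) = s
  have hslen : s.length = arr.length := by rw [← hs]; exact PySem.List.length_sorted arr _ _
  have hsne : s ≠ [] := by
    rw [← hs]
    intro h
    exact hne ((PySem.List.sorted_eq_nil_iff arr _ _).mp h)
  have hsorted : s.Pairwise (· ≤ ·) := by
    rw [← hs]
    simpa using PySem.List.sorted_pairwise arr (fun x => x)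
  have hpos : 0 < s.length := List.length_pos_of_ne_nil hsne
  have hdiv : Int.tdiv ((s.length : Int) - 1) 2 = PySem.Int.floordiv ((s.length : Int) - 1) 2 := by
    show _ = ((s.length : Int) - 1).fdiv 2
    exact pv_tdiv_eq_fdiv _ (by omega)
  rw [hdiv]
  generalize (PySem.List.pyGet? s (PySem.Int.floordiv ((s.length : Int) - 1) 2)).getD 0 = m
  have hA := pvLoopA_spec s m (k - (([] : List Int).length : Int)).toNat s 0 [] k rfl
    (by simp) (by simp) (by simp [hslen]; omega)
  rw [sorted2_eq_sorted_pvKey, ← pvMerge_eq_sorted_rev m s hsorted,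
    PySem.List.slice_to _ (le_max_right k 0)]
  have htn : (max k 0).toNat = k.toNat := by omega
  rw [htn]
  simpa using hA
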